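-- pv_equiv track=rewrite | github.com/htc3p/OOD-EXERCISE | chap2item5.py | bon
-- ===== SOURCE A (Python) =====
-- def bon(w):
--     eng = 'abcdefghijklmnopqrstuvwxyz'
--     sum = 0
--     elements = {}
--     for char in w:
--         if elements.get(char,None) != None:
--             elements[char]+=1
--         else:
--             elements[char] = 1
--
--     for k, v in elements.items():
--         if v>1:
--             for i, j in enumerate(eng):
--                 if k==j:
--                     sum += (i+1)*4
--
--     return sum
-- ===== SOURCE B (Python) =====
-- def bon(w):
--     eng = 'abcdefghijklmnopqrstuvwxyz'
--     return sum((i + 1) * 4 for i, c in enumerate(eng) if w.count(c) > 1)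
-- ===== Notes on version B (the rewrite author's own statement) =====
-- stated objective: idiomatic
-- what changed: Replaced the hand-rolled dict frequency counter plus a per-key scan of the alphabet by a single comprehension over the 26 letters that adds (i+1)*4 whenever w.count(letter) > 1.
import Mathlib
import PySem

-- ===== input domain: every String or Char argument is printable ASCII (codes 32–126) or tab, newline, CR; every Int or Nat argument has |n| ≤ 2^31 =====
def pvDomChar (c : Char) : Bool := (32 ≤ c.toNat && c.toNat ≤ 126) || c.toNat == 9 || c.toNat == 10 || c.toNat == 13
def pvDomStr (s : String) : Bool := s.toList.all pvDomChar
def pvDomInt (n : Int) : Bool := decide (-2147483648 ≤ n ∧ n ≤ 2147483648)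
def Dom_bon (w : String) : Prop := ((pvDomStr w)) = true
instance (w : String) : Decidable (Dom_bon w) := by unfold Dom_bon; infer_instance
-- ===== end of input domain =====

-- B replaces A's hand-rolled dict frequency counter plus per-key alphabet scan by one
-- comprehension over the 26 letters keyed on w.count (objective: idiomatic); equal return value.


-- ===== PORT A =====
-- literal port of A: build the frequency dict with get(char, None) (insert-or-increment),
-- then for each item (k, v) with v > 1 scan enumerate(eng) and add (i+1)*4 where k == j.
def bon (w : String) : Int :=
  ((w.toList.foldl (fun d char =>
      match d.get? char with
      | some v => d.insert char (v + 1)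
      | none => d.insert char 1) (PySem.Dict.empty : PySem.Dict Char Int)).items).foldl
    (fun sum kv =>
      if kv.2 > 1 then
        (PySem.List.enumerate "abcdefghijklmnopqrstuvwxyz".toList 0).foldl
          (fun s ij => if kv.1 == ij.2 then s + (ij.1 + 1) * 4 else s) sum
      else sum) 0

-- ===== PORT B =====
-- literal port of B: sum((i + 1) * 4 for i, c in enumerate(eng) if w.count(c) > 1)
def bon_alt (w : String) : Int :=
  (((PySem.List.enumerate "abcdefghijklmnopqrstuvwxyz".toList 0).filter
      (fun ic => 1 < PySem.Str.count w (String.ofList [ic.2]))).map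
    (fun ic => (ic.1 + 1) * 4)).sum

-- ===== PRECONDITION & SPEC =====
def Spec_bon (w : String) (out : Int) : Prop := out = bon_alt w
instance (w : String) (out : Int) : Decidable (Spec_bon w out) := by unfold Spec_bon; infer_instance

-- ===== CLAIM (what is proved, stated in full; the proofs are below) =====
def Claim_equal_bon : Prop := ∀ (w : String), Dom_bon w → Spec_bon w (bon w)

-- ===== LEMMAS AND PROOFS =====

-- str.count with a single-character needle is plain character counting
theorem charsCountGo_single (c : Char) :
    ∀ (fuel : Nat) (l : List Char) (acc : Nat), l.length ≤ fuel →
      PySem.Chars.count.go [c] fuel l acc = acc + l.count c := by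
  intro fuel
  induction fuel with
  | zero =>
    intro l acc h
    have hl : l = [] := List.eq_nil_of_length_eq_zero (Nat.le_zero.mp h)
    subst hl
    simp [PySem.Chars.count.go]
  | succ n ih =>
    intro l acc h
    cases l with
    | nil => simp [PySem.Chars.count.go]
    | cons x t =>
      have ht : t.length ≤ n := by simpa using Nat.lt_succ_iff.mp (by simpa using h)
      by_cases hx : c = x
      · subst hx
        have hgo : PySem.Chars.count.go [c] (n + 1) (c :: t) acc
            = PySem.Chars.count.go [c] n t (acc + 1) := by
          simp [PySem.Chars.count.go, List.isPrefixOf]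
        rw [hgo, ih t (acc + 1) ht]
        simp
        omega
      · simp [PySem.Chars.count.go, List.isPrefixOf, hx, Ne.symm hx, ih t acc ht]

theorem charsCount_single (c : Char) (s : List Char) :
    PySem.Chars.count s [c] = s.count c := by
  simp [PySem.Chars.count, charsCountGo_single c s.length s 0 le_rfl]

-- sum over a filtered map = sum of an if-map
theorem sum_filter_map {α : Type} (l : List α) (p : α → Bool) (f : α → Int) :
    ((l.filter p).map f).sum = (l.map (fun x => if p x then f x else 0)).sum := by
  induction l with
  | nil => rfl
  | cons x t ih => by_cases h : p x <;> simp [h, ih]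

-- swapping a double sum
theorem sum_swap_int {α β : Type} (l : List α) (m : List β) (f : α → β → Int) :
    (l.map (fun a => (m.map (f a)).sum)).sum
      = (m.map (fun b => (l.map (fun a => f a b)).sum)).sum := by
  induction l with
  | nil => simp
  | cons x t ih =>
    simp only [List.map_cons, List.sum_cons, ih]
    rw [← PySem.List.sum_map_add_int]

-- a nodup sum of a point indicator
theorem sum_indicator_nodup {α : Type} [DecidableEq α] (l : List α) (hl : l.Nodup) (j : α)
    (g : α → Int) :
    (l.map (fun k => if k = j then g k else 0)).sum = if j ∈ l then g j else 0 := by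
  induction l with
  | nil => simp
  | cons x t ih =>
    rcases List.nodup_cons.mp hl with ⟨hx, ht⟩
    by_cases h : x = j
    · subst h
      simp [ih ht, hx]
    · simp [h, ih ht, Ne.symm h]

-- the A-side dict-building loop is the Counter loop
theorem dict_loop_eq_counter (xs : List Char) :
    xs.foldl (fun d char =>
      match d.get? char with
      | some v => d.insert char (v + 1)
      | none => d.insert char 1) (PySem.Dict.empty : PySem.Dict Char Int)
    = PySem.Dict.counter xs := by
  rw [← PySem.Dict.foldl_insert_getD_add_one_eq_counter]
  apply PySem.List.foldl_congr_mem
  intro d c _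
  cases h : d.get? c with
  | none => simp [PySem.Dict.getD, h]
  | some v => simp [PySem.Dict.getD, h]

-- the inner alphabet scan of A, started at sum, adds an indicator sum
theorem inner_loop_eq (k : Char) (E : List (Int × Char)) (sum : Int) :
    E.foldl (fun s ij => if k == ij.2 then s + (ij.1 + 1) * 4 else s) sum
      = sum + (E.map (fun ij => if k = ij.2 then (ij.1 + 1) * 4 else 0)).sum := by
  have h : (fun (s : Int) (ij : Int × Char) => if k == ij.2 then s + (ij.1 + 1) * 4 else s)
      = fun s ij => s + (if k = ij.2 then (ij.1 + 1) * 4 else 0) := by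
    funext s ij
    by_cases hk : k = ij.2 <;> simp [hk]
  rw [h, PySem.List.foldl_add]

-- port A in double-sum normal form
theorem bon_eq_normal (w : String) :
    bon w = ((PySem.List.enumerate "abcdefghijklmnopqrstuvwxyz".toList 0).map
      (fun ij => if 1 < w.toList.count ij.2 then (ij.1 + 1) * 4 else 0)).sum := by
  unfold bon
  rw [dict_loop_eq_counter, PySem.Dict.items_counter]
  simp only [List.foldl_map]
  have hstep : (fun (sum : Int) (k : Char) =>
        if ((k, (w.toList.count k : Int)) : Char × Int).2 > 1 then
          (PySem.List.enumerate "abcdefghijklmnopqrstuvwxyz".toList 0).foldl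
            (fun s ij => if ((k, (w.toList.count k : Int)) : Char × Int).1 == ij.2 then
              s + (ij.1 + 1) * 4 else s) sum
        else sum)
      = fun sum k => sum +
          ((PySem.List.enumerate "abcdefghijklmnopqrstuvwxyz".toList 0).map (fun ij =>
            if 1 < w.toList.count k then (if k = ij.2 then (ij.1 + 1) * 4 else 0) else 0)).sum := by
    funext sum k
    by_cases h : ((w.toList.count k : Int)) > 1
    · have hn : 1 < w.toList.count k := by exact_mod_cast h
      simp only [if_pos h, inner_loop_eq, hn, if_true]
    · have hn : ¬ 1 < w.toList.count k := by
        intro hc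
        exact h (by exact_mod_cast hc)
      simp [hn]
  rw [hstep, PySem.List.foldl_add, zero_add, sum_swap_int]
  apply congrArg List.sum
  apply List.map_congr_left
  intro ij _
  have hcomm : (fun k => if 1 < w.toList.count k then
        (if k = ij.2 then (ij.1 + 1) * 4 else 0) else (0 : Int))
      = fun k => if k = ij.2 then (if 1 < w.toList.count k then (ij.1 + 1) * 4 else 0) else 0 := by
    funext k
    by_cases h1 : 1 < w.toList.count k <;> by_cases h2 : k = ij.2 <;> simp [h1, h2]
  rw [hcomm, sum_indicator_nodup _ (PySem.Set.nodup_ofList w.toList) ij.2 _]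
  by_cases hm : ij.2 ∈ PySem.Set.ofList w.toList
  · simp [hm]
  · have hc : ¬ 1 < w.toList.count ij.2 := by
      intro hc
      exact hm ((PySem.Set.mem_ofList _ _).mpr (List.count_pos_iff.mp (by omega)))
    simp [hm, hc]

-- port B in the same normal form
theorem bon_alt_eq_normal (w : String) :
    bon_alt w = ((PySem.List.enumerate "abcdefghijklmnopqrstuvwxyz".toList 0).map
      (fun ij => if 1 < w.toList.count ij.2 then (ij.1 + 1) * 4 else 0)).sum := by
  unfold bon_alt
  rw [sum_filter_map]
  apply congrArg List.sum
  apply List.map_congr_left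
  intro ic _
  simp [PySem.Str.count_eq, String.toList_ofList, charsCount_single]

-- ===== VERDICT (by name: the statement is the Claim_ definition above) =====
theorem bon_spec : Claim_equal_bon := by
  intro w _
  unfold Spec_bon
  rw [bon_eq_normal, bon_alt_eq_normal]
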